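-- pv_equiv track=rewrite | github.com/vojoup/CodeWars | sum_from_0_to_n.py | show_sequence
-- ===== SOURCE A (Python) =====
-- def sum(n):
-- 	res = 0
-- 	for i in range(n + 1):
-- 		res += i
-- 	return res
--
-- def show_sequence(n):
--     if n == 0:
--         return '0=0'
--     elif n <= 0:
--         return str(n) + '<0'
--     else:
--     	res = [ str(x) for x in range(n + 1)]
--     	return '+'.join(res) + ' = ' + str(sum(n))
-- ===== SOURCE B (Python) =====
-- def show_sequence(n):
--     if n > 0:
--         return '+'.join(map(str, range(n + 1))) + ' = ' + str(n * (n + 1) // 2)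
--     return '0=0' if n == 0 else str(n) + '<0'
-- ===== Notes on version B (the rewrite author's own statement) =====
-- stated objective: simpler
-- what changed: Drops the iterative sum helper in favour of the closed Gauss formula computed inline and collapses the three-way guard into one positive branch with a conditional expression.
import Mathlib
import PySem

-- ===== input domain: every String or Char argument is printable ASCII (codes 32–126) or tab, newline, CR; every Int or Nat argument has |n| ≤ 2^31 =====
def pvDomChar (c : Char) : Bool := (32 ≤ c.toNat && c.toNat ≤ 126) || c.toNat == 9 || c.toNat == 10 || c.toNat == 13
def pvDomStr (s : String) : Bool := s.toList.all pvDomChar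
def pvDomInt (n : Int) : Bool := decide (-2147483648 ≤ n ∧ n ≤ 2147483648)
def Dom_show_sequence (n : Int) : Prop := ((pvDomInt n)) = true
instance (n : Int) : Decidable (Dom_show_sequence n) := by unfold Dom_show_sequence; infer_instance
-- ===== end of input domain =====

-- B replaces A's iterative sum helper with the closed Gauss formula and a single positive-branch guard; same outputs, simpler code.


-- ===== PORT A =====
-- helper 'sum(n)': res = 0; for i in range(n+1): res += i
def pySum (n : Int) : Int :=
  (PySem.List.pyRange 0 (n + 1) 1).foldl (fun res i => res + i) 0

def show_sequence (n : Int) : String :=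
  if n == 0 then "0=0"
  else if n ≤ 0 then PySem.Int.toStr n ++ "<0"
  else
    let res := (PySem.List.pyRange 0 (n + 1) 1).map PySem.Int.toStr
    PySem.Str.join "+" res ++ " = " ++ PySem.Int.toStr (pySum n)

-- ===== PORT B =====
def show_sequence_alt (n : Int) : String :=
  if 0 < n then
    PySem.Str.join "+" ((PySem.List.pyRange 0 (n + 1) 1).map PySem.Int.toStr)
      ++ " = " ++ PySem.Int.toStr (PySem.Int.floordiv (n * (n + 1)) 2)
  else if n == 0 then "0=0"
  else PySem.Int.toStr n ++ "<0"

-- ===== PRECONDITION & SPEC =====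
def Spec_show_sequence (n : Int) (out : String) : Prop := out = show_sequence_alt n
instance (n : Int) (out : String) : Decidable (Spec_show_sequence n out) := by unfold Spec_show_sequence; infer_instance

-- ===== CLAIM (what is proved, stated in full; the proofs are below) =====
def Claim_equal_show_sequence : Prop := ∀ (n : Int), Dom_show_sequence n → Spec_show_sequence n (show_sequence n)

-- ===== LEMMAS AND PROOFS =====

-- Gauss: twice the loop's sum over range(n+1) is n*(n+1), by induction on n.toNat
theorem two_mul_pySum (m : Nat) : 2 * pySum (m : Int) = (m : Int) * ((m : Int) + 1) := by
  induction m with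
  | zero =>
    unfold pySum
    decide
  | succ k ih =>
    have h : PySem.List.pyRange 0 ((k : Int) + 1 + 1) 1
        = PySem.List.pyRange 0 ((k : Int) + 1) 1 ++ [(k : Int) + 1] :=
      PySem.List.pyRange_one_succ_right (by positivity)
    unfold pySum at ih ⊢
    push_cast
    rw [h, List.foldl_append]
    simp only [List.foldl_cons, List.foldl_nil]
    linarith

theorem pySum_eq_floordiv (n : Int) (hn : 0 < n) :
    pySum n = PySem.Int.floordiv (n * (n + 1)) 2 := by
  obtain ⟨m, rfl⟩ : ∃ m : Nat, n = (m : Int) := ⟨n.toNat, (Int.toNat_of_nonneg hn.le).symm⟩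
  have h := two_mul_pySum m
  rw [PySem.Int.floordiv_eq_ediv_of_pos (by norm_num)]
  omega

-- ===== VERDICT (by name: the statement is the Claim_ definition above) =====
theorem show_sequence_spec : Claim_equal_show_sequence := by
  intro n _
  unfold Spec_show_sequence show_sequence show_sequence_alt
  rcases lt_trichotomy n 0 with h | h | h
  · simp [h.ne, not_lt.mpr h.le, h.le]
  · simp [h]
  · simp [h, h.ne', not_le.mpr h, pySum_eq_floordiv n h]
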